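-- pv_equiv track=rewrite | github.com/UriKialy/leetCode | hash.py | nextBeautifulNumber
-- ===== SOURCE A (Python) =====
-- from collections import Counter
--
-- def nextBeautifulNumber(n: int) -> int:
--     n+=1
--     while n < float('inf'):
--         digit_count = Counter(str(n))
--         digit_count = {int(k): v for k, v in digit_count.items()}
--         for key, val in digit_count.items():
--             if key != val:
--                 n += 1
--                 break
--         else:
--             return n
-- ===== SOURCE B (Python) =====
-- def _distinct(xs):
--     seen = []
--     for x in xs:
--         if x not in seen:
--             seen.append(x)
--     return seen
--
--
-- def _perms(pool, prefix):
--     if not pool: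
--         return [prefix]
--     out = []
--     for d in _distinct(pool):
--         rest = pool.copy()
--         rest.remove(d)
--         out += _perms(rest, prefix * 10 + d)
--     return out
--
--
-- def _pools(d, cur, total):
--     if d == 10:
--         return [cur] if cur else []
--     out = _pools(d + 1, cur, total)
--     if total + d <= 10:
--         out += _pools(d + 1, cur + [d] * d, total + d)
--     return out
--
--
-- def _beautiful():
--     out = []
--     for pool in _pools(1, [], 0):
--         out += _perms(pool, 0)
--     return out
--
--
-- _CANDIDATES = _beautiful()
--
--
-- def nextBeautifulNumber(n: int) -> int:
--     best = None
--     for x in _CANDIDATES: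
--         if x > n and (best is None or x < best):
--             best = x
--     return best
-- ===== Notes on version B (the rewrite author's own statement) =====
-- stated objective: faster
-- what changed: A counts digits of every integer from n+1 upward until one is beautiful; B precomputes the full finite set of beautiful numbers (all arrangements of the digit multisets {d repeated d times} with at most 10 digits) once and returns the least precomputed candidate above n in a single pass, never inspecting any other integer.
-- outside the precondition, e.g. on nextBeautifulNumber(-2): A raises ValueError, B returns 1; on nextBeautifulNumber(-5): A raises ValueError, B returns 1
-- crash fix: For every n <= -2 A raises ValueError (it calls int() on the '-' sign character of str(n+1)) while B returns 1, the smallest beautiful number. — e.g. on nextBeautifulNumber(-5): A raises ValueError, B returns 1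
import Mathlib
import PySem

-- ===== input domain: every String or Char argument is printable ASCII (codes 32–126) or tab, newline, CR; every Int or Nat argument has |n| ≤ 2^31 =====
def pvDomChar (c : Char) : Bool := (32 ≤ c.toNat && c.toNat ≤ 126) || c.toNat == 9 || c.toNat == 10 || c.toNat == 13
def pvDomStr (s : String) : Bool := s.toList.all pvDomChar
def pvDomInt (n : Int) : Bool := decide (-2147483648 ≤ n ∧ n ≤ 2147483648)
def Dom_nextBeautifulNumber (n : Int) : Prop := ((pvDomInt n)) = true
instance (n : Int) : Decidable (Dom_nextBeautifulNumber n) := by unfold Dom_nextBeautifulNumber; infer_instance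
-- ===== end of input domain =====

-- B replaces A's one-by-one count-up (re-counting the digits of every integer on the way) by a
-- precomputed list of all numbers whose digit multiset is beautiful (digit d occurs exactly d
-- times), answering with the least candidate above n; objective: faster.

-- ===== PORT A =====
-- int(k) for one key character of Counter(str(n)); exact wherever Python's int() returns a value
-- (digit characters).  On '-' (negative n) Python raises ValueError — excluded by Pre_.
def pvIntOfChar (c : Char) : Int := (PySem.Int.ofChars? [c]).getD 0

-- the 'for key, val in digit_count.items(): if key != val: break / else: return' search
def pvMismatch : List (Int × Int) → Bool
  | [] => false
  | (k, v) :: rest => if k ≠ v then true else pvMismatch rest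

-- one body of A's while loop: True = some digit's count differs from its value (n += 1)
def pvFail (m : Int) : Bool :=
  let digitCount := PySem.Dict.counter (PySem.Int.toChars m)
  let digitCount2 :=
    digitCount.items.foldl (fun d p => d.insert (pvIntOfChar p.1) p.2) PySem.Dict.empty
  pvMismatch digitCount2.items

-- 'while n < float('inf')' is an unbounded count-up; the fuel 10^10 exceeds the distance from any
-- admitted start to the next beautiful number (proved below), so the 0-fuel branch is unreachable.
def pvALoop : Nat → Int → Int
  | 0, m => m
  | f + 1, m => if pvFail m then pvALoop f (m + 1) else m

def nextBeautifulNumber (n : Int) : Int := pvALoop 10000000000 (n + 1)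

-- ===== PORT B =====
-- _distinct(xs): first occurrence of each element in order = PySem.Set.ofList
def pvDistinct (xs : List Int) : List Int := PySem.Set.ofList xs

-- _perms: all distinct arrangements of the multiset 'pool' appended after the digits of 'pre'.
-- 'rest.remove(d)' with d ∈ pool is List.erase.  The recursion is bounded by the structural fuel
-- N = pool.length (each call removes exactly one element, proved below), a totality guard only.
def pvPermsF : Nat → List Int → Int → List Int
  | 0, _, pre => [pre]
  | N + 1, pool, pre =>
    if pool = [] then [pre]
    else (pvDistinct pool).foldl
      (fun out d => out ++ pvPermsF N (pool.erase d) (pre * 10 + d)) []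

def pvPerms (pool : List Int) (pre : Int) : List Int := pvPermsF pool.length pool pre

-- _pools: every multiset {digit d repeated d times, d in a chosen subset of 1..9} of ≤ 10 digits;
-- 'd == 10' becomes structural fuel (10 - d).toNat = 0, the loop variable d is kept unchanged
def pvPoolsF : Nat → Int → List Int → Int → List (List Int)
  | 0, _, cur, _ => if cur = [] then [] else [cur]
  | k + 1, d, cur, total =>
    pvPoolsF k (d + 1) cur total ++
      (if total + d ≤ 10 then pvPoolsF k (d + 1) (cur ++ PySem.List.pyRepeat [d] d) (total + d)
       else [])

def pvPools (d : Int) (cur : List Int) (total : Int) : List (List Int) :=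
  pvPoolsF (10 - d).toNat d cur total

def pvCandidates : List Int :=
  (pvPools 1 [] 0).foldl (fun out pool => out ++ pvPerms pool 0) []

-- 'if x > n and (best is None or x < best): best = x'
def pvStep (n : Int) (best : Option Int) (x : Int) : Option Int :=
  if decide (n < x) && (best.isNone || decide (x < best.getD 0)) then some x else best

-- 'best' is never None for admitted n (some candidate exceeds every n ≤ 2^31, proved below),
-- so the .getD 0 default is unreachable there.
def nextBeautifulNumber_alt (n : Int) : Int :=
  (pvCandidates.foldl (pvStep n) none).getD 0

-- ===== PRECONDITION & SPEC =====
-- For n ≤ -2 the first scanned value n+1 is negative, str(n+1) starts with '-', and int('-')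
-- raises ValueError; A returns normally exactly for n ≥ -1.
def Pre_nextBeautifulNumber (n : Int) : Prop := -1 ≤ n
instance (n : Int) : Decidable (Pre_nextBeautifulNumber n) := by
  unfold Pre_nextBeautifulNumber; infer_instance
def pvWitness_nextBeautifulNumber : Int := (100)

-- On every n ≤ -2 A raises ValueError (int('-') on the sign character) while B returns 1, the
-- smallest beautiful number.
def Raises_nextBeautifulNumber (n : Int) : Prop := n ≤ -2
instance (n : Int) : Decidable (Raises_nextBeautifulNumber n) := by
  unfold Raises_nextBeautifulNumber; infer_instance
def pvRaiseWitness_nextBeautifulNumber : Int := (-5)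
def pvRaiseWitnessOut_nextBeautifulNumber : Int := 1

def Spec_nextBeautifulNumber (n : Int) (out : Int) : Prop := out = nextBeautifulNumber_alt n
instance (n : Int) (out : Int) : Decidable (Spec_nextBeautifulNumber n out) := by
  unfold Spec_nextBeautifulNumber; infer_instance

-- ===== CLAIM (what is proved, stated in full; the proofs are below) =====
def Claim_equal_nextBeautifulNumber : Prop :=
  ∀ (n : Int), Dom_nextBeautifulNumber n → Pre_nextBeautifulNumber n →
    Spec_nextBeautifulNumber n (nextBeautifulNumber n)

def Claim_raises_nextBeautifulNumber : Prop :=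
  (∀ (n : Int), Dom_nextBeautifulNumber n → Raises_nextBeautifulNumber n →
      ¬ Pre_nextBeautifulNumber n) ∧
    (Dom_nextBeautifulNumber (pvRaiseWitness_nextBeautifulNumber) ∧
      Raises_nextBeautifulNumber (pvRaiseWitness_nextBeautifulNumber) ∧
      nextBeautifulNumber_alt (pvRaiseWitness_nextBeautifulNumber) =
        pvRaiseWitnessOut_nextBeautifulNumber)

-- ===== LEMMAS AND PROOFS =====

-- ---- decimal-representation bridge: Nat.toDigits as a structural recursion ----
def pvDigitsSpec (M : Nat) : List Char :=
  if M < 10 then [Nat.digitChar M]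
  else pvDigitsSpec (M / 10) ++ [Nat.digitChar (M % 10)]
termination_by M
decreasing_by exact Nat.div_lt_self (by omega) (by omega)

theorem pvToDigitsCore_eq (f : Nat) : ∀ (M : Nat) (acc : List Char), M < f →
    Nat.toDigitsCore 10 f M acc = pvDigitsSpec M ++ acc := by
  induction f with
  | zero => intro M acc h; omega
  | succ f ih =>
    intro M acc h
    rw [Nat.toDigitsCore]
    by_cases h10 : M / 10 = 0
    · have hlt : M < 10 := by omega
      rw [pvDigitsSpec]
      simp [h10, hlt, Nat.mod_eq_of_lt hlt]
    · have hge : ¬ M < 10 := by omega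
      simp only [h10, if_false]
      rw [ih (M / 10) _ (by omega)]
      conv_rhs => rw [pvDigitsSpec]
      simp [hge]

theorem pvToChars_nonneg (m : Int) (h : 0 ≤ m) :
    PySem.Int.toChars m = pvDigitsSpec m.toNat := by
  have : ¬ m < 0 := by omega
  simp only [PySem.Int.toChars, this, if_false]
  rw [Nat.toDigits, pvToDigitsCore_eq (m.toNat + 1) m.toNat [] (by omega), List.append_nil]

-- ---- digit characters ----
def pvCharVal (c : Char) : Int := (c.toNat : Int) - 48

theorem pvDigitChar_val : ∀ d : Nat, d < 10 → (Nat.digitChar d).toNat = 48 + d := by decide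
theorem pvDigitChar_int : ∀ d : Nat, d < 10 → pvIntOfChar (Nat.digitChar d) = (d : Int) := by
  decide
theorem pvDigitChar_inj (d e : Nat) (hd : d < 10) (he : e < 10)
    (h : Nat.digitChar d = Nat.digitChar e) : d = e := by
  have h1 := pvDigitChar_val d hd
  have h2 := pvDigitChar_val e he
  have := congrArg Char.toNat h
  omega

theorem pvCharVal_digitChar (d : Nat) (hd : d < 10) :
    pvCharVal (Nat.digitChar d) = (d : Int) := by
  unfold pvCharVal
  rw [pvDigitChar_val d hd]
  omega

-- ---- value of a digit list ----
def pvVal (σ : List Int) (pre : Int) : Int := σ.foldl (fun a d => a * 10 + d) pre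

theorem pvVal_nil (pre : Int) : pvVal [] pre = pre := rfl
theorem pvVal_cons (d : Int) (σ : List Int) (pre : Int) :
    pvVal (d :: σ) pre = pvVal σ (pre * 10 + d) := rfl

theorem pvVal_append (σ : List Int) (e pre : Int) :
    pvVal (σ ++ [e]) pre = pvVal σ pre * 10 + e := by
  simp [pvVal]

theorem pvVal_ge (σ : List Int) : ∀ pre : Int, (∀ e ∈ σ, 0 ≤ e) → 0 ≤ pre →
    pre ≤ pvVal σ pre := by
  induction σ with
  | nil => intro pre _ _; simp [pvVal_nil]
  | cons d σ ih =>
    intro pre h hp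
    rw [pvVal_cons]
    have hd : 0 ≤ d := h d (by simp)
    have h1 : pre ≤ pre * 10 + d := by nlinarith
    exact le_trans h1 (ih _ (fun e he => h e (by simp [he])) (by nlinarith))

theorem pvVal_lt (σ : List Int) : ∀ pre ub : Int, (∀ e ∈ σ, e ≤ 9 ∧ 0 ≤ e) →
    pre < ub → 0 < ub → pvVal σ pre < ub * 10 ^ σ.length := by
  induction σ with
  | nil => intro pre ub _ hub _; simpa [pvVal_nil] using hub
  | cons d σ ih =>
    intro pre ub h hub hub0
    rw [pvVal_cons]
    have hd := h d (by simp)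
    have h1 : pre * 10 + d < ub * 10 := by nlinarith
    have := ih (pre * 10 + d) (ub * 10) (fun e he => h e (by simp [he])) h1 (by nlinarith)
    calc pvVal σ (pre * 10 + d) < ub * 10 * 10 ^ σ.length := this
      _ = ub * 10 ^ (d :: σ).length := by rw [List.length_cons]; ring

theorem pvVal_pos (σ : List Int) (hne : σ ≠ []) (h : ∀ e ∈ σ, 1 ≤ e ∧ e ≤ 9) :
    1 ≤ pvVal σ 0 := by
  cases σ with
  | nil => exact absurd rfl hne
  | cons f rest =>
    rw [pvVal_cons]
    have hf := h f (by simp)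
    have hrest : ∀ e ∈ rest, 0 ≤ e := by
      intro e he; have := (h e (by simp [he])).1; omega
    have := pvVal_ge rest (0 * 10 + f) hrest (by omega)
    omega

-- ---- properties of pvDigitsSpec ----
theorem pvDigitsSpec_ne_nil (M : Nat) : pvDigitsSpec M ≠ [] := by
  rw [pvDigitsSpec]
  split
  · exact List.cons_ne_nil _ _
  · intro hc
    exact absurd (List.append_eq_nil_iff.mp hc).2 (List.cons_ne_nil _ _)

theorem pvDigitsSpec_mem (M : Nat) : ∀ c ∈ pvDigitsSpec M, ∃ d, d < 10 ∧ c = Nat.digitChar d := by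
  induction M using Nat.strong_induction_on with
  | _ M ih =>
    rw [pvDigitsSpec]
    split
    · rename_i h
      intro c hc
      simp at hc
      exact ⟨M, h, hc⟩
    · rename_i h
      intro c hc
      rcases List.mem_append.mp hc with hc | hc
      · exact ih (M / 10) (Nat.div_lt_self (by omega) (by omega)) c hc
      · simp at hc
        exact ⟨M % 10, Nat.mod_lt _ (by omega), hc⟩

theorem pvDigitsSpec_val (M : Nat) : pvVal ((pvDigitsSpec M).map pvCharVal) 0 = (M : Int) := by
  induction M using Nat.strong_induction_on with
  | _ M ih =>
    rw [pvDigitsSpec]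
    split
    · rename_i h
      simp [pvVal_cons, pvVal_nil, pvCharVal_digitChar M h]
    · rename_i h
      rw [List.map_append, List.map_singleton, pvVal_append,
        ih (M / 10) (Nat.div_lt_self (by omega) (by omega)),
        pvCharVal_digitChar (M % 10) (Nat.mod_lt _ (by omega))]
      have := Nat.div_add_mod M 10
      push_cast
      omega

theorem pvDigitsSpec_len (M : Nat) : ∀ k : Nat, 1 ≤ k → M < 10 ^ k →
    (pvDigitsSpec M).length ≤ k := by
  induction M using Nat.strong_induction_on with
  | _ M ih =>
    intro k hk h
    rw [pvDigitsSpec]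
    split
    · simpa using hk
    · rename_i hge
      have hk2 : 2 ≤ k := by
        by_contra hc
        interval_cases k <;> omega
      rw [List.length_append, List.length_singleton]
      have : M / 10 < 10 ^ (k - 1) := by
        have h10 : (10:Nat) ^ k = 10 ^ (k-1) * 10 := by
          rw [← pow_succ]; congr 1; omega
        omega
      have := ih (M / 10) (Nat.div_lt_self (by omega) (by omega)) (k - 1) (by omega) this
      omega

-- inverse: the digit string of a value assembled from digits 1..9
theorem pvDigitsSpec_inv (σ : List Int) (hne : σ ≠ []) (hd : ∀ e ∈ σ, 1 ≤ e ∧ e ≤ 9) :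
    pvDigitsSpec (pvVal σ 0).toNat = σ.map (fun e => Nat.digitChar e.toNat) := by
  induction σ using List.reverseRecOn with
  | nil => exact absurd rfl hne
  | append_singleton σ' e ih =>
    rcases List.eq_nil_or_concat σ' with h | _
    · subst h
      have he := hd e (by simp)
      rw [pvVal_append, pvVal_nil]
      have ht : ((0 * 10 + e)).toNat = e.toNat := by omega
      rw [show (0:Int) * 10 + e = e by ring] at ht ⊢
      rw [pvDigitsSpec]
      have : e.toNat < 10 := by omega
      simp [this]
    · have hne' : σ' ≠ [] := by rename_i h; rcases h with ⟨l, a, rfl⟩; simp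
      have hd' : ∀ x ∈ σ', 1 ≤ x ∧ x ≤ 9 := fun x hx => hd x (by simp [hx])
      have he := hd e (by simp)
      have hv' : 1 ≤ pvVal σ' 0 := pvVal_pos σ' hne' hd'
      rw [pvVal_append]
      have hM : (pvVal σ' 0 * 10 + e).toNat = (pvVal σ' 0).toNat * 10 + e.toNat := by omega
      rw [hM, pvDigitsSpec]
      have hge : ¬ ((pvVal σ' 0).toNat * 10 + e.toNat < 10) := by omega
      have hdiv : ((pvVal σ' 0).toNat * 10 + e.toNat) / 10 = (pvVal σ' 0).toNat := by omega
      have hmod : ((pvVal σ' 0).toNat * 10 + e.toNat) % 10 = e.toNat := by omega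
      simp only [hge, if_false, hdiv, hmod]
      rw [ih hne' hd', List.map_append]
      simp

-- ---- pvMismatch / pvFail characterization ----
theorem pvMismatch_eq_false (l : List (Int × Int)) :
    pvMismatch l = false ↔ ∀ p ∈ l, p.1 = p.2 := by
  induction l with
  | nil => simp [pvMismatch]
  | cons p rest ih =>
    obtain ⟨k, v⟩ := p
    by_cases hkv : k = v <;> simp [pvMismatch, hkv, ih]

theorem pvFail_def (m : Int) : pvFail m =
    pvMismatch (((PySem.Dict.counter (PySem.Int.toChars m)).items.foldl
      (fun d p => d.insert (pvIntOfChar p.1) p.2) PySem.Dict.empty).items) := rfl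

theorem pvFail_eq_false (m : Int) (hm : 0 ≤ m) :
    pvFail m = false ↔
      ∀ c ∈ pvDigitsSpec m.toNat,
        pvIntOfChar c = ((pvDigitsSpec m.toNat).count c : Int) := by
  set cs := pvDigitsSpec m.toNat with hcs
  have hmem : ∀ c ∈ cs, ∃ d, d < 10 ∧ c = Nat.digitChar d := pvDigitsSpec_mem m.toNat
  have hinj : ∀ c₁ ∈ PySem.Set.ofList cs, ∀ c₂ ∈ PySem.Set.ofList cs,
      pvIntOfChar c₁ = pvIntOfChar c₂ → c₁ = c₂ := by
    intro c₁ h₁ c₂ h₂ he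
    obtain ⟨d₁, hd₁, rfl⟩ := hmem c₁ ((PySem.Set.mem_ofList _ _).mp h₁)
    obtain ⟨d₂, hd₂, rfl⟩ := hmem c₂ ((PySem.Set.mem_ofList _ _).mp h₂)
    rw [pvDigitChar_int d₁ hd₁, pvDigitChar_int d₂ hd₂] at he
    exact congrArg _ (by exact_mod_cast he)
  have hfresh : ∀ a ∈ (PySem.Dict.counter cs).items,
      (PySem.Dict.empty : PySem.Dict Int Int).contains (pvIntOfChar a.1) = false := by
    intro a _; exact PySem.Dict.contains_empty _
  have hnod : (((PySem.Dict.counter cs).items).map (fun p => pvIntOfChar p.1)).Nodup := by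
    rw [PySem.Dict.items_counter, List.map_map]
    exact (PySem.Set.nodup_ofList cs).map_on
      (by intro x hx y hy hxy; exact hinj x hx y hy hxy)
  have hitems := PySem.Dict.items_foldl_insert_fresh ((PySem.Dict.counter cs).items)
    (fun p => pvIntOfChar p.1) (fun p => p.2) PySem.Dict.empty hfresh hnod
  rw [pvFail_def, pvToChars_nonneg m hm, ← hcs, hitems]
  rw [PySem.Dict.items_counter, List.map_map]
  rw [show (PySem.Dict.empty : PySem.Dict Int Int).items = [] from rfl, List.nil_append]
  rw [pvMismatch_eq_false]
  constructor
  · intro h c hc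
    exact h (pvIntOfChar c, (cs.count c : Int))
      (List.mem_map.mpr ⟨c, (PySem.Set.mem_ofList _ _).mpr hc, rfl⟩)
  · intro h p hp
    obtain ⟨c, hc, rfl⟩ := List.mem_map.mp hp
    exact h c ((PySem.Set.mem_ofList _ _).mp hc)

-- counting through the digit-char coding
theorem pvCount_map_char (σ : List Int) (h : ∀ e ∈ σ, 0 ≤ e ∧ e ≤ 9) (e : Int)
    (he0 : 0 ≤ e) (he9 : e ≤ 9) :
    (σ.map (fun i => Nat.digitChar i.toNat)).count (Nat.digitChar e.toNat) = σ.count e := by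
  induction σ with
  | nil => simp
  | cons i σ ih =>
    have hi := h i (by simp)
    have heq : (Nat.digitChar i.toNat = Nat.digitChar e.toNat) ↔ i = e := by
      constructor
      · intro hh
        have := pvDigitChar_inj i.toNat e.toNat (by omega) (by omega) hh
        omega
      · intro hh; rw [hh]
    simp only [List.map_cons, List.count_cons, ih (fun x hx => h x (by simp [hx]))]
    by_cases hie : i = e
    · simp [hie]
    · have : ¬ (Nat.digitChar i.toNat = Nat.digitChar e.toNat) := fun hh => hie (heq.mp hh)
      simp [hie, this]

-- ---- the selection pool ----
def pvSelPool (p : Int → Bool) (d : Int) : List Int :=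
  if 10 - d ≤ 0 then []
  else (if p d then List.replicate d.toNat d else []) ++ pvSelPool p (d + 1)
termination_by (10 - d).toNat
decreasing_by omega

theorem pvSelPool_count (p : Int → Bool) : ∀ (k : Nat) (d x : Int), (10 - d).toNat = k →
    1 ≤ d →
    ((pvSelPool p d).count x : Int) = if d ≤ x ∧ x ≤ 9 ∧ p x then x else 0 := by
  intro k
  induction k with
  | zero =>
    intro d x hk hd
    rw [pvSelPool]
    have h0 : (10:Int) - d ≤ 0 := by omega
    have hno : ¬ (d ≤ x ∧ x ≤ 9 ∧ p x) := by rintro ⟨h1, h2, _⟩; omega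
    simp [h0, hno]
  | succ k ih =>
    intro d x hk hd
    rw [pvSelPool]
    have hlt : ¬ ((10:Int) - d ≤ 0) := by omega
    simp only [hlt, if_false, List.count_append]
    have hrep : (((if p d then List.replicate d.toNat d else []).count x : Nat) : Int) =
        if p d ∧ x = d then d else 0 := by
      by_cases hp : p d
      · by_cases hxd : x = d
        · subst hxd
          simp [hp, Int.toNat_of_nonneg (by omega : (0:Int) ≤ x)]
        · have hdx : d ≠ x := fun h => hxd h.symm
          simp [hp, hxd, List.count_replicate, hdx]
      · simp [hp]
    have hrest := ih (d + 1) x (by omega) (by omega)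
    push_cast
    push_cast at hrep hrest
    rw [hrep, hrest]
    by_cases hxd : x = d
    · subst hxd
      by_cases hp : p x
      · have h1 : ¬ (x + 1 ≤ x ∧ x ≤ 9 ∧ p x) := by rintro ⟨h1, _, _⟩; omega
        have h2 : x ≤ 9 := by omega
        simp [hp, h2]
      · simp [hp]
    · have hcong : (d ≤ x ∧ x ≤ 9 ∧ p x) ↔ (d + 1 ≤ x ∧ x ≤ 9 ∧ p x) := by
        constructor
        · rintro ⟨h1, h2, h3⟩
          exact ⟨by rcases lt_or_eq_of_le h1 with h | h; omega; exact absurd h.symm hxd, h2, h3⟩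
        · rintro ⟨h1, h2, h3⟩; exact ⟨by omega, h2, h3⟩
      have hnd : ¬ (p d ∧ x = d) := by rintro ⟨_, h⟩; exact hxd h
      rw [if_neg hnd, zero_add, if_congr hcong rfl rfl]
-- ---- unfolding the fueled ports ----
theorem pvPerms_nil (pre : Int) : pvPerms [] pre = [pre] := rfl

theorem pvPermsF_congr : ∀ (N : Nat) (pool : List Int) (pre : Int), pool.length ≤ N →
    pvPermsF N pool pre = pvPerms pool pre := by
  intro N
  induction N with
  | zero =>
    intro pool pre h
    have : pool = [] := List.eq_nil_of_length_eq_zero (by omega)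
    subst this
    rfl
  | succ N ih =>
    intro pool pre h
    by_cases hne : pool = []
    · subst hne; rfl
    · obtain ⟨L, hL⟩ : ∃ L, pool.length = L + 1 :=
        ⟨pool.length - 1, by have := List.length_pos_of_ne_nil hne; omega⟩
      rw [pvPermsF, if_neg hne]
      unfold pvPerms
      rw [hL, pvPermsF, if_neg hne]
      apply PySem.List.foldl_congr_mem
      intro acc x hx
      have hxp : x ∈ pool := (PySem.Set.mem_ofList _ _).mp hx
      have hle : (pool.erase x).length = L := by
        rw [List.length_erase_of_mem hxp]; omega
      congr 1
      rw [ih _ _ (by omega)]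
      unfold pvPerms
      rw [hle]

theorem pvPerms_unfold (pool : List Int) (pre : Int) (hne : pool ≠ []) :
    pvPerms pool pre = (PySem.Set.ofList pool).foldl
      (fun out d => out ++ pvPerms (pool.erase d) (pre * 10 + d)) [] := by
  obtain ⟨L, hL⟩ : ∃ L, pool.length = L + 1 :=
    ⟨pool.length - 1, by have := List.length_pos_of_ne_nil hne; omega⟩
  unfold pvPerms
  rw [hL, pvPermsF, if_neg hne]
  apply PySem.List.foldl_congr_mem
  intro acc x hx
  have hxp : x ∈ pool := (PySem.Set.mem_ofList _ _).mp hx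
  congr 1
  rw [pvPermsF_congr L _ _ (by rw [List.length_erase_of_mem hxp]; omega)]
  rfl

theorem pvPools_stop (d : Int) (cur : List Int) (total : Int) (h : 10 - d ≤ 0) :
    pvPools d cur total = if cur = [] then [] else [cur] := by
  unfold pvPools
  rw [show (10 - d).toNat = 0 from by omega]
  rfl

theorem pvPools_go (d : Int) (cur : List Int) (total : Int) (h : ¬ (10 - d ≤ 0)) :
    pvPools d cur total = pvPools (d + 1) cur total ++
      (if total + d ≤ 10 then pvPools (d + 1) (cur ++ PySem.List.pyRepeat [d] d) (total + d)
       else []) := by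
  unfold pvPools
  rw [show (10 - d).toNat = (10 - (d + 1)).toNat + 1 from by omega]
  rfl

-- ---- pool enumeration: completeness ----
theorem pvPools_complete (p : Int → Bool) : ∀ (k : Nat) (d : Int) (cur : List Int) (total : Int),
    (10 - d).toNat = k → 1 ≤ d →
    total + (pvSelPool p d).length ≤ 10 →
    (cur ≠ [] ∨ pvSelPool p d ≠ []) →
    cur ++ pvSelPool p d ∈ pvPools d cur total := by
  intro k
  induction k with
  | zero =>
    intro d cur total hk hd hsum hne
    have h0 : (10:Int) - d ≤ 0 := by omega
    rw [pvSelPool, if_pos h0] at hsum hne ⊢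
    have hcur : cur ≠ [] := by
      rcases hne with h | h
      · exact h
      · exact absurd rfl h
    rw [pvPools_stop _ _ _ h0, if_neg hcur, List.append_nil]
    simp
  | succ k ih =>
    intro d cur total hk hd hsum hne
    have hlt : ¬ ((10:Int) - d ≤ 0) := by omega
    rw [pvSelPool, if_neg hlt] at hsum hne ⊢
    rw [pvPools_go _ _ _ hlt]
    by_cases hp : p d
    · rw [if_pos hp] at hsum hne ⊢
      have hd9 : d ≤ 9 := by omega
      have hrl : ((List.replicate d.toNat d).length : Int) = d := by
        rw [List.length_replicate]; omega
      have hgo : total + d ≤ 10 := by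
        rw [List.length_append] at hsum; push_cast at hsum; omega
      refine List.mem_append_right _ ?_
      rw [if_pos hgo]
      have hrep : cur ++ PySem.List.pyRepeat [d] d = cur ++ List.replicate d.toNat d := by
        rw [PySem.List.pyRepeat_singleton]
      rw [hrep]
      have hmem := ih (d+1) (cur ++ List.replicate d.toNat d) (total + d) (by omega) (by omega)
        (by rw [List.length_append] at hsum; push_cast at hsum ⊢; omega)
        (Or.inl (by
          intro hc
          have := congrArg List.length hc
          rw [List.length_append, List.length_replicate] at this
          simp at this
          omega))
      rw [List.append_assoc] at hmem
      exact hmem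
    · rw [if_neg hp, List.nil_append] at hsum hne ⊢
      exact List.mem_append_left _ (ih (d+1) cur total (by omega) (by omega) hsum hne)

-- ---- permutation enumeration: completeness ----
theorem pvPerms_complete : ∀ (σ pool : List Int) (pre : Int),
    σ.Perm pool → pvVal σ pre ∈ pvPerms pool pre := by
  intro σ
  induction σ with
  | nil =>
    intro pool pre h
    have : pool = [] := h.symm.eq_nil
    subst this
    rw [pvPerms_nil]
    simp [pvVal_nil]
  | cons d σ ih =>
    intro pool pre h
    have hdm : d ∈ pool := h.mem_iff.mp (by simp)
    have hne : pool ≠ [] := by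
      rintro rfl
      simp at hdm
    rw [pvPerms_unfold _ _ hne, PySem.List.foldl_append_eq_flatMap, List.nil_append]
    refine List.mem_flatMap.mpr ⟨d, (PySem.Set.mem_ofList _ _).mpr hdm, ?_⟩
    rw [pvVal_cons]
    apply ih
    exact (h.trans (List.perm_cons_erase hdm)).cons_inv

-- ---- permutation enumeration: soundness ----
theorem pvPerms_sound_aux : ∀ (N : Nat) (pool : List Int), pool.length ≤ N → ∀ (pre x : Int),
    x ∈ pvPerms pool pre → ∃ σ, σ.Perm pool ∧ x = pvVal σ pre := by
  intro N
  induction N with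
  | zero =>
    intro pool hN pre x hx
    have : pool = [] := List.eq_nil_of_length_eq_zero (by omega)
    subst this
    rw [pvPerms_nil] at hx
    simp at hx
    exact ⟨[], List.Perm.refl _, by simp [hx, pvVal_nil]⟩
  | succ N ih =>
    intro pool hN pre x hx
    by_cases hne : pool = []
    · subst hne
      rw [pvPerms_nil] at hx
      simp at hx
      exact ⟨[], List.Perm.refl _, by simp [hx, pvVal_nil]⟩
    · rw [pvPerms_unfold _ _ hne, PySem.List.foldl_append_eq_flatMap, List.nil_append] at hx
      obtain ⟨d, hd, hx⟩ := List.mem_flatMap.mp hx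
      have hdm : d ∈ pool := (PySem.Set.mem_ofList _ _).mp hd
      have hpos := List.length_pos_of_ne_nil hne
      have hlen : (pool.erase d).length ≤ N := by
        rw [List.length_erase_of_mem hdm]; omega
      obtain ⟨σ', hperm, hval⟩ := ih (pool.erase d) hlen (pre * 10 + d) x hx
      exact ⟨d :: σ', (hperm.cons d).trans (List.perm_cons_erase hdm).symm,
        by rw [pvVal_cons]; exact hval⟩

theorem pvPerms_sound (pool : List Int) (pre : Int) (x : Int) (hx : x ∈ pvPerms pool pre) :
    ∃ σ, σ.Perm pool ∧ x = pvVal σ pre :=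
  pvPerms_sound_aux pool.length pool le_rfl pre x hx

-- ---- pool enumeration: soundness ----
theorem pvPools_sound : ∀ (k : Nat) (d : Int) (cur : List Int) (total : Int) (pool : List Int),
    (10 - d).toNat = k → 1 ≤ d →
    (∀ e ∈ cur, 1 ≤ e ∧ e ≤ 9 ∧ e < d) →
    (∀ e ∈ cur, (cur.count e : Int) = e) →
    total = (cur.length : Int) → total ≤ 10 →
    pool ∈ pvPools d cur total →
    pool ≠ [] ∧ (∀ e ∈ pool, 1 ≤ e ∧ e ≤ 9) ∧
      (∀ e ∈ pool, (pool.count e : Int) = e) ∧ pool.length ≤ 10 := by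
  intro k
  induction k with
  | zero =>
    intro d cur total pool hk hd hmem hcount htot hle hpool
    have h0 : (10:Int) - d ≤ 0 := by omega
    rw [pvPools_stop _ _ _ h0] at hpool
    by_cases hcur : cur = []
    · rw [if_pos hcur] at hpool
      simp at hpool
    · rw [if_neg hcur] at hpool
      simp at hpool
      subst hpool
      exact ⟨hcur, fun e he => ⟨(hmem e he).1, (hmem e he).2.1⟩, hcount, by omega⟩
  | succ k ih =>
    intro k' cur total pool hk hd hmem hcount htot hle hpool
    have hlt : ¬ ((10:Int) - k' ≤ 0) := by omega
    rw [pvPools_go _ _ _ hlt] at hpool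
    rcases List.mem_append.mp hpool with hp | hp
    · exact ih (k'+1) cur total pool (by omega) (by omega)
        (fun e he => ⟨(hmem e he).1, (hmem e he).2.1, by have := (hmem e he).2.2; omega⟩)
        hcount htot hle hp
    · by_cases hg : total + k' ≤ 10
      · rw [if_pos hg, PySem.List.pyRepeat_singleton] at hp
        have hd9 : k' ≤ 9 := by omega
        have hdnotin : k' ∉ cur := fun hdc => by have := (hmem k' hdc).2.2; omega
        have hrl : ((List.replicate k'.toNat k').length : Int) = k' := by
          rw [List.length_replicate]; omega
        refine ih (k'+1) (cur ++ List.replicate k'.toNat k') (total + k') pool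
          (by omega) (by omega) ?_ ?_ ?_ (by omega) hp
        · intro e he
          rcases List.mem_append.mp he with h | h
          · obtain ⟨h1, h2, h3⟩ := hmem e h
            exact ⟨h1, h2, by omega⟩
          · have : e = k' := List.eq_of_mem_replicate h
            subst this
            exact ⟨hd, hd9, by omega⟩
        · intro e he
          rw [List.count_append]
          rcases List.mem_append.mp he with h | h
          · have hed : k' ≠ e := fun hh => hdnotin (hh ▸ h)
            have hz : (List.replicate k'.toNat k').count e = 0 := by
              simp [List.count_replicate, hed]
            rw [hz]
            have := hcount e h
            push_cast
            omega
          · have : e = k' := List.eq_of_mem_replicate h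
            subst this
            have h1 : cur.count e = 0 := List.count_eq_zero.mpr hdnotin
            rw [h1]
            have h2 : (List.replicate e.toNat e).count e = e.toNat := by
              simp
            rw [h2]
            push_cast
            omega
        · rw [List.length_append]
          push_cast
          omega
      · rw [if_neg hg] at hp
        simp at hp

-- ---- candidates ----
theorem pvCandidates_eq :
    pvCandidates = (pvPools 1 [] 0).flatMap (fun pool => pvPerms pool 0) := by
  rw [pvCandidates, PySem.List.foldl_append_eq_flatMap, List.nil_append]

theorem pvCandidates_sound (x : Int) (hx : x ∈ pvCandidates) :
    pvFail x = false ∧ 0 < x ∧ x < 10 ^ 10 := by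
  rw [pvCandidates_eq] at hx
  obtain ⟨pool, hpool, hx⟩ := List.mem_flatMap.mp hx
  obtain ⟨hne, hdig, hcnt, hlen⟩ := pvPools_sound 9 1 [] 0 pool (by decide) le_rfl
    (by simp) (by simp) (by simp) (by norm_num) hpool
  obtain ⟨σ, hperm, rfl⟩ := pvPerms_sound pool 0 x hx
  have hσne : σ ≠ [] := by
    rintro rfl
    exact hne hperm.symm.eq_nil
  have hσdig : ∀ e ∈ σ, 1 ≤ e ∧ e ≤ 9 := fun e he => hdig e (hperm.mem_iff.mp he)
  have hσcnt : ∀ e ∈ σ, (σ.count e : Int) = e := fun e he => by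
    rw [hperm.count_eq]
    exact hcnt e (hperm.mem_iff.mp he)
  have hσlen : σ.length ≤ 10 := hperm.length_eq ▸ hlen
  have hpos : 0 < pvVal σ 0 := by
    have := pvVal_pos σ hσne hσdig
    omega
  have hlt : pvVal σ 0 < 10 ^ 10 := by
    have h1 := pvVal_lt σ 0 1 (fun e he => ⟨(hσdig e he).2, by have := (hσdig e he).1; omega⟩)
      (by norm_num) (by norm_num)
    rw [one_mul] at h1
    have h2 : (10:Int) ^ σ.length ≤ 10 ^ 10 :=
      pow_le_pow_right₀ (by norm_num) hσlen
    omega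
  refine ⟨?_, hpos, hlt⟩
  rw [pvFail_eq_false _ (le_of_lt hpos)]
  rw [pvDigitsSpec_inv σ hσne hσdig]
  intro c hc
  obtain ⟨e, he, rfl⟩ := List.mem_map.mp hc
  have he19 := hσdig e he
  have het : e.toNat < 10 := by omega
  have h09 : ∀ y ∈ σ, 0 ≤ y ∧ y ≤ 9 := fun y hy =>
    ⟨by have := (hσdig y hy).1; omega, (hσdig y hy).2⟩
  have hcm := pvCount_map_char σ h09 e (by omega) (by omega)
  rw [pvDigitChar_int e.toNat het, hcm]
  have := hσcnt e he
  omega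

theorem pvCandidates_complete (m : Int) (h0 : 0 ≤ m) (hub : m < 10 ^ 10)
    (hf : pvFail m = false) : m ∈ pvCandidates := by
  have H := (pvFail_eq_false m h0).mp hf
  set cs := pvDigitsSpec m.toNat with hcs
  have hmem := pvDigitsSpec_mem m.toNat
  rw [← hcs] at hmem
  set ds := cs.map pvCharVal with hds
  have hkey : ∀ c ∈ cs, ∃ e : Nat, e < 10 ∧ c = Nat.digitChar e ∧ (e:Int) = (cs.count c : Int) := by
    intro c hc
    obtain ⟨e, he, rfl⟩ := hmem c hc
    exact ⟨e, he, rfl, by rw [← pvDigitChar_int e he]; exact H _ hc⟩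
  have hda : ∀ x ∈ ds, 1 ≤ x ∧ x ≤ 9 := by
    intro x hx
    obtain ⟨c, hc, rfl⟩ := List.mem_map.mp hx
    obtain ⟨e, he, rfl, hval⟩ := hkey c hc
    rw [pvCharVal_digitChar e he]
    have hcpos : 0 < cs.count (Nat.digitChar e) := List.count_pos_iff.mpr hc
    constructor
    · omega
    · omega
  have hback : ds.map (fun e => Nat.digitChar e.toNat) = cs := by
    rw [hds, List.map_map]
    conv_rhs => rw [← List.map_id cs]
    apply List.map_congr_left
    intro c hc
    obtain ⟨e, he, rfl, _⟩ := hkey c hc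
    simp [Function.comp, pvCharVal_digitChar e he]
  have hdcnt : ∀ x ∈ ds, (ds.count x : Int) = x := by
    intro x hx
    obtain ⟨c, hc, rfl⟩ := List.mem_map.mp hx
    obtain ⟨e, he, rfl, hval⟩ := hkey c hc
    rw [pvCharVal_digitChar e he]
    have h09 : ∀ y ∈ ds, 0 ≤ y ∧ y ≤ 9 := fun y hy =>
      ⟨by have := (hda y hy).1; omega, (hda y hy).2⟩
    have hcm := pvCount_map_char ds h09 (e:Int) (by omega) (by omega)
    rw [hback] at hcm
    rw [show ((e:Int)).toNat = e from Int.toNat_natCast e] at hcm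
    rw [← hcm]
    omega
  have hne : ds ≠ [] := by
    rw [hds]
    intro h
    have h2 := List.map_eq_nil_iff.mp h
    rw [hcs] at h2
    exact pvDigitsSpec_ne_nil m.toNat h2
  have hpow : (10:Int) ^ 10 = 10000000000 := by norm_num
  have hlen : ds.length ≤ 10 := by
    rw [hds, List.length_map, hcs]
    apply pvDigitsSpec_len m.toNat 10 (by norm_num)
    have h1 : (m.toNat : Int) = m := Int.toNat_of_nonneg h0
    have h2 : (10:Nat) ^ 10 = 10000000000 := by norm_num
    omega
  set p : Int → Bool := fun e => decide (e ∈ ds) with hp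
  have hperm : ds.Perm (pvSelPool p 1) := by
    rw [List.perm_iff_count]
    intro x
    have hsel := pvSelPool_count p 9 1 x (by decide) le_rfl
    by_cases hx : x ∈ ds
    · have h19 := hda x hx
      have hcond : (1:Int) ≤ x ∧ x ≤ 9 ∧ p x := ⟨h19.1, h19.2, by rw [hp]; simp [hx]⟩
      rw [if_pos hcond] at hsel
      have := hdcnt x hx
      omega
    · have hcond : ¬ ((1:Int) ≤ x ∧ x ≤ 9 ∧ p x) := by
        rintro ⟨_, _, h3⟩
        rw [hp] at h3
        simp at h3
        exact hx h3
      rw [if_neg hcond] at hsel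
      have h2 : ds.count x = 0 := List.count_eq_zero.mpr hx
      omega
  have hselne : pvSelPool p 1 ≠ [] := by
    intro h
    rw [h] at hperm
    exact hne hperm.eq_nil
  have hpoolmem : [] ++ pvSelPool p 1 ∈ pvPools 1 [] 0 := by
    apply pvPools_complete p 9 1 [] 0 (by decide) le_rfl
    · have := hperm.length_eq
      omega
    · exact Or.inr hselne
  have hval : pvVal ds 0 = m := by
    rw [hds, hcs]
    rw [pvDigitsSpec_val m.toNat]
    exact Int.toNat_of_nonneg h0
  rw [pvCandidates_eq]
  exact List.mem_flatMap.mpr ⟨pvSelPool p 1, by simpa using hpoolmem,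
    hval ▸ pvPerms_complete ds (pvSelPool p 1) 0 hperm⟩

-- ---- the running-minimum fold ----
theorem pvStep_some (n : Int) (y x : Int) : ∃ z, pvStep n (some y) x = some z := by
  unfold pvStep
  split
  · exact ⟨x, rfl⟩
  · exact ⟨y, rfl⟩

theorem pvFold_some_mono (n : Int) (l : List Int) : ∀ (y : Int),
    l.foldl (pvStep n) (some y) ≠ none := by
  induction l with
  | nil => intro y; simp
  | cons x l ih =>
    intro y
    rw [List.foldl_cons]
    obtain ⟨z, hz⟩ := pvStep_some n y x
    rw [hz]
    exact ih z

theorem pvFold_none (n : Int) (l : List Int) (h : l.foldl (pvStep n) none = none) :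
    ∀ x ∈ l, ¬ n < x := by
  induction l with
  | nil => simp
  | cons x l ih =>
    rw [List.foldl_cons] at h
    by_cases hx : n < x
    · exfalso
      have hs : pvStep n none x = some x := by unfold pvStep; simp [hx]
      rw [hs] at h
      exact pvFold_some_mono n l x h
    · have hs : pvStep n none x = none := by unfold pvStep; simp [hx]
      rw [hs] at h
      intro y hy
      rcases List.mem_cons.mp hy with rfl | hy
      · exact hx
      · exact ih h y hy

theorem pvFold_mem (n : Int) (l : List Int) (w : Int) : ∀ (b : Option Int),
    l.foldl (pvStep n) b = some w → b = some w ∨ w ∈ l := by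
  induction l with
  | nil =>
    intro b h
    simp at h
    exact Or.inl h
  | cons x l ih =>
    intro b h
    rw [List.foldl_cons] at h
    rcases ih (pvStep n b x) h with h1 | h1
    · unfold pvStep at h1
      split at h1
      · simp at h1
        exact Or.inr (by simp [h1])
      · exact Or.inl h1
    · exact Or.inr (List.mem_cons_of_mem _ h1)

theorem pvFold_gt (n : Int) (l : List Int) (w : Int) : ∀ (b : Option Int),
    (∀ y, b = some y → n < y) → l.foldl (pvStep n) b = some w → n < w := by
  induction l with
  | nil =>
    intro b hb h
    simp at h
    exact hb w h
  | cons x l ih =>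
    intro b hb h
    rw [List.foldl_cons] at h
    refine ih (pvStep n b x) ?_ h
    intro y hy
    unfold pvStep at hy
    split at hy
    · rename_i hc
      simp only [Bool.and_eq_true, decide_eq_true_eq] at hc
      simp at hy
      omega
    · exact hb y hy

theorem pvFold_min (n : Int) (l : List Int) (w : Int) : ∀ (b : Option Int),
    l.foldl (pvStep n) b = some w →
    (∀ x ∈ l, n < x → w ≤ x) ∧ (∀ y, b = some y → w ≤ y) := by
  induction l with
  | nil =>
    intro b h
    simp at h
    subst h
    exact ⟨by simp, fun y hy => by simp at hy; omega⟩
  | cons x l ih =>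
    intro b h
    rw [List.foldl_cons] at h
    obtain ⟨h1, h2⟩ := ih (pvStep n b x) h
    have hstep : ∀ z, pvStep n b x = some z → w ≤ z := h2
    constructor
    · intro z hz hnz
      rcases List.mem_cons.mp hz with rfl | hzl
      · by_cases hc : (decide (n < z) && (b.isNone || decide (z < b.getD 0))) = true
        · exact hstep z (by unfold pvStep; rw [if_pos hc])
        · have hc' := hc
          simp only [Bool.and_eq_true, Bool.or_eq_true, decide_eq_true_eq,
            Option.isNone_iff_eq_none] at hc
          push_neg at hc
          obtain ⟨hb1, hb2⟩ := hc hnz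
          cases hbv : b with
          | none => exact absurd hbv hb1
          | some c =>
            have hcz : c ≤ z := by
              rw [hbv] at hb2
              simpa using hb2
            rw [hbv] at hc'
            have : w ≤ c := hstep c (by unfold pvStep; rw [hbv, if_neg hc'])
            omega
      · exact h1 z hzl hnz
    · intro y hy
      by_cases hc : (decide (n < x) && (b.isNone || decide (x < b.getD 0))) = true
      · have hwx : w ≤ x := hstep x (by unfold pvStep; rw [if_pos hc])
        simp only [Bool.and_eq_true, Bool.or_eq_true, decide_eq_true_eq,
          Option.isNone_iff_eq_none] at hc
        rcases hc.2 with hb | hb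
        · rw [hy] at hb; simp at hb
        · rw [hy] at hb
          simp at hb
          omega
      · exact hstep y (by unfold pvStep; rw [if_neg hc, hy])

-- the alt port returns the least candidate above n
theorem pvAlt_eq (n w : Int) (hw : w ∈ pvCandidates) (hnw : n < w)
    (hmin : ∀ x ∈ pvCandidates, n < x → w ≤ x) : nextBeautifulNumber_alt n = w := by
  unfold nextBeautifulNumber_alt
  rcases hr : pvCandidates.foldl (pvStep n) none with _ | w'
  · exact absurd hnw (pvFold_none n _ hr w hw)
  · have hmemo := pvFold_mem n _ w' none hr
    have hmem : w' ∈ pvCandidates := by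
      rcases hmemo with h | h
      · simp at h
      · exact h
    have hgt : n < w' := pvFold_gt n _ w' none (by simp) hr
    have hmin' := (pvFold_min n _ w' none hr).1
    have hle1 : w ≤ w' := hmin w' hmem hgt
    have hle2 : w' ≤ w := hmin' w hw hnw
    simp only [Option.getD_some]
    omega

-- ---- the count-up loop ----
theorem pvALoop_eq : ∀ (k : Nat) (m w : Int), m ≤ w → w - m < (k : Int) →
    pvFail w = false → (∀ x, m ≤ x → x < w → pvFail x = true) → pvALoop k m = w := by
  intro k
  induction k with
  | zero =>
    intro m w h1 h2 _ _
    omega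
  | succ k ih =>
    intro m w h1 h2 hw hx
    by_cases hmw : m = w
    · subst hmw
      rw [pvALoop, hw]
      simp
    · have hfm : pvFail m = true := hx m le_rfl (by omega)
      rw [pvALoop, hfm]
      simp only [if_true]
      exact ih (m + 1) w (by omega) (by push_cast at h2 ⊢; omega) hw
        (fun x hx1 hx2 => hx x (by omega) hx2)

-- ===== VERDICT (by name: the statement is the Claim_ definition above) =====
theorem nextBeautifulNumber_spec : Claim_equal_nextBeautifulNumber := by
  unfold Claim_equal_nextBeautifulNumber
  intro n hdom hpre
  unfold Spec_nextBeautifulNumber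
  unfold Dom_nextBeautifulNumber pvDomInt at hdom
  unfold Pre_nextBeautifulNumber at hpre
  have hdom' : -2147483648 ≤ n ∧ n ≤ 2147483648 := of_decide_eq_true hdom
  have hpow : (10:Int) ^ 10 = 10000000000 := by norm_num
  have hbig : (9999999991 : Int) ∈ pvCandidates :=
    pvCandidates_complete 9999999991 (by norm_num) (by norm_num) (by decide)
  rcases hr : pvCandidates.foldl (pvStep n) none with _ | w
  · exact absurd (by omega : n < (9999999991:Int)) (pvFold_none n _ hr _ hbig)
  · have hwmem : w ∈ pvCandidates := by
      rcases pvFold_mem n _ w none hr with h | h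
      · simp at h
      · exact h
    have hwgt : n < w := pvFold_gt n _ w none (by simp) hr
    have hwmin := (pvFold_min n _ w none hr).1
    obtain ⟨hwfail, hwpos, hwlt⟩ := pvCandidates_sound w hwmem
    have halt : nextBeautifulNumber_alt n = w := pvAlt_eq n w hwmem hwgt hwmin
    rw [halt]
    unfold nextBeautifulNumber
    apply pvALoop_eq
    · omega
    · push_cast
      omega
    · exact hwfail
    · intro x hx1 hx2
      by_contra hc
      have hxf : pvFail x = false := by
        revert hc
        cases pvFail x <;> simp
      have hxc : x ∈ pvCandidates := pvCandidates_complete x (by omega) (by omega) hxf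
      have := hwmin x hxc (by omega)
      omega

@[simp]
theorem nextBeautifulNumber_raises : Claim_raises_nextBeautifulNumber := by
  unfold Claim_raises_nextBeautifulNumber
  constructor
  · intro n _ hr
    unfold Raises_nextBeautifulNumber at hr
    unfold Pre_nextBeautifulNumber
    omega
  · refine ⟨by decide, by decide, ?_⟩
    have h1 : (1:Int) ∈ pvCandidates :=
      pvCandidates_complete 1 (by norm_num) (by norm_num) (by decide)
    show nextBeautifulNumber_alt (-5) = 1
    apply pvAlt_eq (-5) 1 h1 (by norm_num)
    intro x hx _
    have := (pvCandidates_sound x hx).2.1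
    omega
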